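-- pv_equiv track=rewrite | github.com/Geckuss/TKT200011 | Viikko-4/bigwin.py | count
-- ===== SOURCE A (Python) =====
-- def count(t):
--     counts = {}
--     total = 0
--     for num in t:
--         if num % 2 == 0:
--             total += counts.get(num // 2, 0)
--         counts[num] = counts.get(num, 0) + 1
--     return total
-- ===== SOURCE B (Python) =====
-- def count(t):
--     total = 0
--     for j in range(len(t)):
--         for i in range(j):
--             if t[j] == 2 * t[i]:
--                 total += 1
--     return total
-- ===== Notes on version B (the rewrite author's own statement) =====
-- stated objective: alternative
-- what changed: Replaces the dict-accumulator single pass (evenness test, floor-halving, running counts) with a brute-force enumeration of index pairs i<j that counts pairs with t[j] == 2*t[i]; no auxiliary structure, no mod/floordiv.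
import Mathlib
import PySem

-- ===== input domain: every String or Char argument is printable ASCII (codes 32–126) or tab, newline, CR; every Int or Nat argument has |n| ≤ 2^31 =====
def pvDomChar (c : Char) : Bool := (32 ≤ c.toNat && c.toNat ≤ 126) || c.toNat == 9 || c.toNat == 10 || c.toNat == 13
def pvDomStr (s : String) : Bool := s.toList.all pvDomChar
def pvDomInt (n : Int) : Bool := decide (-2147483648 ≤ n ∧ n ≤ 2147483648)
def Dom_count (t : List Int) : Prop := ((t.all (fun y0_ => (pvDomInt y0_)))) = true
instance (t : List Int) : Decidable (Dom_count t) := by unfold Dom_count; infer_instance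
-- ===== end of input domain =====

-- B replaces A's dict-accumulator single pass by a brute-force double loop over index pairs i<j counting t[j] == 2*t[i] (alternative algorithm, not faster).


-- ===== PORT A =====
def count (t : List Int) : Int :=
  (t.foldl
    (fun (st : PySem.Dict Int Int × Int) num =>
      let counts := st.1
      let total :=
        if PySem.Int.mod num 2 == 0 then
          st.2 + counts.getD (PySem.Int.floordiv num 2) 0
        else st.2
      (counts.insert num (counts.getD num 0 + 1), total))
    (PySem.Dict.empty, 0)).2

-- ===== PORT B =====
def count_alt (t : List Int) : Int :=
  (PySem.List.pyRange 0 (PySem.List.len t) 1).foldl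
    (fun total j =>
      (PySem.List.pyRange 0 j 1).foldl
        (fun tot i =>
          if PySem.List.pyGetD t j 0 == 2 * PySem.List.pyGetD t i 0 then tot + 1 else tot)
        total)
    0

-- ===== PRECONDITION & SPEC =====
def Spec_count (t : List Int) (out : Int) : Prop := out = count_alt t
instance (t : List Int) (out : Int) : Decidable (Spec_count t out) := by unfold Spec_count; infer_instance

-- ===== CLAIM (what is proved, stated in full; the proofs are below) =====
def Claim_equal_count : Prop := ∀ (t : List Int), Dom_count t → Spec_count t (count t)

-- ===== LEMMAS AND PROOFS =====

-- common specification: the contribution of the suffix l, given the already-seen prefix pref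
def pvSpecAux (pref l : List Int) : Int :=
  match l with
  | [] => 0
  | x :: l' =>
      (pref.countP (fun a => x == 2 * a) : Int) + pvSpecAux (pref ++ [x]) l'

-- A's per-element contribution equals the prefix countP of "x is twice this element"
theorem pvStep (x : Int) (pref : List Int) :
    (if PySem.Int.mod x 2 == 0 then (pref.count (PySem.Int.floordiv x 2) : Int) else 0)
      = (pref.countP (fun a => x == 2 * a) : Int) := by
  by_cases h : PySem.Int.mod x 2 = 0
  · obtain ⟨k, hk⟩ := (PySem.Int.mod_eq_zero_iff_dvd x 2).1 h
    have hq : PySem.Int.floordiv x 2 = k :=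
      (PySem.Int.floordiv_eq_iff_of_pos (by omega)).2 ⟨by omega, by omega⟩
    have hc : (PySem.Int.mod x 2 == 0) = true := by rw [h]; rfl
    rw [if_pos hc, hq]
    have : pref.countP (fun a => x == 2 * a) = pref.count k := by
      unfold List.count
      exact List.countP_congr (by intro a _; simp [hk]; omega)
    rw [this]
  · have h2 : ¬ (2 ∣ x) := fun hd => h ((PySem.Int.mod_eq_zero_iff_dvd x 2).2 hd)
    rw [if_neg (by simpa using h)]
    have : pref.countP (fun a => x == 2 * a) = 0 := by
      apply List.countP_eq_zero.2
      intro a _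
      simp only [beq_iff_eq]
      exact fun he => h2 ⟨a, he⟩
    simp [this]

theorem count_aux (l : List Int) (pref : List Int) (d : PySem.Dict Int Int) (tot : Int)
    (hd : ∀ v, d.getD v 0 = (pref.count v : Int)) :
    (l.foldl
      (fun (st : PySem.Dict Int Int × Int) num =>
        let counts := st.1
        let total :=
          if PySem.Int.mod num 2 == 0 then
            st.2 + counts.getD (PySem.Int.floordiv num 2) 0
          else st.2
        (counts.insert num (counts.getD num 0 + 1), total))
      (d, tot)).2 = tot + pvSpecAux pref l := by
  induction l generalizing pref d tot with
  | nil => simp [pvSpecAux]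
  | cons x l ih =>
      simp only [List.foldl_cons, pvSpecAux]
      rw [ih (pref ++ [x])]
      · rw [hd, ← pvStep x pref]
        split_ifs <;> ring
      · intro v
        by_cases hv : v = x
        · subst hv
          rw [PySem.Dict.getD_insert_self, hd]
          simp
        · rw [PySem.Dict.getD_insert_of_ne _ _ _ hv, hd]
          simp [List.count_append, Ne.symm hv]

-- B's inner loop over range(j) counts, in the prefix, the elements whose double is t[j]
theorem count_alt_inner (pref rest : List Int) (x : Int) (c : Int) :
    ((PySem.List.pyRange 0 (pref.length : Int) 1).foldl
      (fun tot i =>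
        if x == 2 * PySem.List.pyGetD (pref ++ rest) i 0 then tot + 1 else tot)
      c) = c + (pref.countP (fun a => x == 2 * a) : Int) := by
  have hcongr :
      ((PySem.List.pyRange 0 (pref.length : Int) 1).foldl
        (fun tot i =>
          if x == 2 * PySem.List.pyGetD (pref ++ rest) i 0 then tot + 1 else tot) c)
      = ((PySem.List.pyRange 0 (pref.length : Int) 1).foldl
        (fun tot i =>
          if x == 2 * PySem.List.pyGetD pref i 0 then tot + 1 else tot) c) := by
    apply PySem.List.foldl_congr_mem
    intro acc i hi
    have hi' := (PySem.List.mem_pyRange_one).1 hi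
    have hget : PySem.List.pyGetD (pref ++ rest) i 0 = PySem.List.pyGetD pref i 0 := by
      rw [PySem.List.pyGetD_eq_getElem (pref ++ rest) 0 hi'.1 (by simp; omega),
          PySem.List.pyGetD_eq_getElem pref 0 hi'.1 hi'.2]
      exact List.getElem_append_left (by omega)
    rw [hget]
  rw [hcongr,
      PySem.List.foldl_pyRange_zero_pyGetD' pref 0
        (fun tot a => if x == 2 * a then tot + 1 else tot) c,
      PySem.List.foldl_if_add_one]

theorem count_alt_aux (t : List Int) (l pref : List Int) (c : Int) (ht : t = pref ++ l) :
    ((PySem.List.pyRange (pref.length : Int) (t.length : Int) 1).foldl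
      (fun total j =>
        (PySem.List.pyRange 0 j 1).foldl
          (fun tot i =>
            if PySem.List.pyGetD t j 0 == 2 * PySem.List.pyGetD t i 0 then tot + 1 else tot)
          total)
      c) = c + pvSpecAux pref l := by
  induction l generalizing pref c with
  | nil =>
      subst ht
      simp [PySem.List.pyRange_one_eq_nil, pvSpecAux]
  | cons x l ih =>
      have hlen : (pref.length : Int) < (t.length : Int) := by
        subst ht; simp
      rw [PySem.List.pyRange_one_cons hlen, List.foldl_cons]
      have hx : PySem.List.pyGetD t (pref.length : Int) 0 = x := by
        rw [PySem.List.pyGetD_eq_getElem t 0 (by omega) (by subst ht; simp)]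
        subst ht
        simp
      have hinner := count_alt_inner pref (x :: l) x c
      rw [hx]
      have heq :
          ((PySem.List.pyRange 0 (pref.length : Int) 1).foldl
            (fun tot i => if x == 2 * PySem.List.pyGetD t i 0 then tot + 1 else tot) c)
          = c + (pref.countP (fun a => x == 2 * a) : Int) := by
        subst ht; exact hinner
      rw [heq]
      have hrec := ih (pref ++ [x]) (c + (pref.countP (fun a => x == 2 * a) : Int))
        (by rw [ht]; simp)
      have hlen2 : ((pref ++ [x]).length : Int) = (pref.length : Int) + 1 := by
        simp
      rw [hlen2] at hrec
      rw [hrec, pvSpecAux]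
      ring

-- ===== VERDICT (by name: the statement is the Claim_ definition above) =====
theorem count_spec : Claim_equal_count := by
  intro t _
  unfold Spec_count count count_alt
  rw [count_aux t [] PySem.Dict.empty 0 (by intro v; simp [PySem.Dict.getD])]
  have := count_alt_aux t t [] 0 (by simp)
  simp only [List.length_nil, Nat.cast_zero, PySem.List.len_eq] at this ⊢
  rw [this]
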